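-- pv_equiv track=rewrite | github.com/maksdeb-g/Project_SNOL | evaluator.py | error_finder
-- ===== SOURCE A (Python) =====
-- def error_finder(postfix: str) -> bool:
--     """
--     Check if all operands in a postfix expression are of the same data type.
--
--     Args:
--         postfix (str): The postfix expression to check.
--
--     Returns:
--         bool: True if all operands are of the same type, False otherwise.
--     """
--     tokens = postfix.split()  # Split the postfix expression into tokens
--     prev_type = None  # Track the type of the previous operand
--
--     for token in tokens:
--         is_number = token.lstrip('-').replace('.', '', 1).isdigit()
--         if is_number:
--             # Determine the type of the current operand (1 for integer, 0 for float)
--             curr_type = 1 if '.' not in token else 0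
--             if prev_type is not None and curr_type != prev_type:
--                 # If types mismatch, return False
--                 return False
--             prev_type = curr_type
--     return True  # All operands are of the same type
-- ===== SOURCE B (Python) =====
-- def error_finder(postfix: str) -> bool:
--     """A mixed-type error exists exactly when the expression contains BOTH a
--     float operand and an integer operand.  Decide by two independent
--     existential scans and negate their conjunction -- no type tracking."""
--     tokens = postfix.split()
--     has_float = any(t.lstrip('-').replace('.', '', 1).isdigit() and '.' in t
--                     for t in tokens)
--     has_int = any(t.lstrip('-').replace('.', '', 1).isdigit() and '.' not in t
--                   for t in tokens)
--     return not (has_float and has_int)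
-- ===== Notes on version B (the rewrite author's own statement) =====
-- stated objective: simpler
-- what changed: B drops A's running previous-type state and early-exit loop entirely: it performs two independent existential scans (does a float operand exist? does an integer operand exist?) and returns the negation of their conjunction, which is equivalent because a type mismatch occurs exactly when both kinds are present.
import Mathlib
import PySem

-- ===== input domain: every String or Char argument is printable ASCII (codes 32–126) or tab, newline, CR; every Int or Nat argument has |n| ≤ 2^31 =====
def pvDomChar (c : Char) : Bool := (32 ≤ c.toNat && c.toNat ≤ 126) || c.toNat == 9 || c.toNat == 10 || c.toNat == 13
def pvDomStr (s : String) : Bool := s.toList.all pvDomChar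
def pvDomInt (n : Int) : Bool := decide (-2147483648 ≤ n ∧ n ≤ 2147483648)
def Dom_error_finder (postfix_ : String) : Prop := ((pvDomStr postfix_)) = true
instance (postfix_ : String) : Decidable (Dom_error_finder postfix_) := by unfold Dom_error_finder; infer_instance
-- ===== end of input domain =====

-- B is simpler: it replaces A's stateful previous-type loop by two independent existential
-- scans (a float operand exists / an integer operand exists) and negates their conjunction.

-- ===== PORT A =====
-- token.replace('.', '', 1): removes the first '.' only — exact hand port (PySem.replace has no count)
def pvRemoveDot : List Char → List Char
  | [] => []
  | c :: cs => if c == '.' then cs else c :: pvRemoveDot cs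

-- token.lstrip('-').replace('.', '', 1).isdigit(): lstrip('-') with a single strip char is
-- exactly dropWhile (· == '-'); isdigit via PySem. Shared: both Pythons use this very expression.
def pvIsNum (t : List Char) : Bool :=
  PySem.Chars.strIsdigit (pvRemoveDot (t.dropWhile (· == '-')))

def error_finder_loop (prev : Option Int) : List (List Char) → Bool
  | [] => true
  | t :: ts =>
    if pvIsNum t then
      let curr : Int := if PySem.Chars.isIn ['.'] t then 0 else 1
      match prev with
      | some p => if curr ≠ p then false else error_finder_loop (some curr) ts
      | none => error_finder_loop (some curr) ts
    else error_finder_loop prev ts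

def error_finder (postfix_ : String) : Bool :=
  error_finder_loop none (PySem.Chars.split₀ postfix_.toList)

-- ===== PORT B =====
def error_finder_alt (postfix_ : String) : Bool :=
  let tokens := PySem.Chars.split₀ postfix_.toList
  let has_float := tokens.any (fun t => pvIsNum t && PySem.Chars.isIn ['.'] t)
  let has_int := tokens.any (fun t => pvIsNum t && !PySem.Chars.isIn ['.'] t)
  !(has_float && has_int)

-- ===== PRECONDITION & SPEC =====
def Spec_error_finder (postfix_ : String) (out : Bool) : Prop := out = error_finder_alt postfix_
instance (postfix_ : String) (out : Bool) : Decidable (Spec_error_finder postfix_ out) := by unfold Spec_error_finder; infer_instance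

-- ===== CLAIM (what is proved, stated in full; the proofs are below) =====
def Claim_equal_error_finder : Prop := ∀ (postfix_ : String), Dom_error_finder postfix_ → Spec_error_finder postfix_ (error_finder postfix_)

-- ===== LEMMAS AND PROOFS =====

-- with prev = some 0 (a float was seen), A's loop succeeds iff no integer operand remains
theorem pvLoop_zero (ts : List (List Char)) :
    error_finder_loop (some 0) ts = !(ts.any (fun t => pvIsNum t && !PySem.Chars.isIn ['.'] t)) := by
  induction ts with
  | nil => rfl
  | cons t ts ih =>
    simp only [error_finder_loop, List.any_cons]
    by_cases h : pvIsNum t = true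
    · by_cases hc : PySem.Chars.isIn ['.'] t = true <;> simp [h, hc, ih]
    · simp [h, ih]

-- with prev = some 1 (an integer was seen), A's loop succeeds iff no float operand remains
theorem pvLoop_one (ts : List (List Char)) :
    error_finder_loop (some 1) ts = !(ts.any (fun t => pvIsNum t && PySem.Chars.isIn ['.'] t)) := by
  induction ts with
  | nil => rfl
  | cons t ts ih =>
    simp only [error_finder_loop, List.any_cons]
    by_cases h : pvIsNum t = true
    · by_cases hc : PySem.Chars.isIn ['.'] t = true <;> simp [h, hc, ih]
    · simp [h, ih]

-- from prev = None, A's loop succeeds iff not (a float exists and an integer exists)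
theorem pvLoop_none (ts : List (List Char)) :
    error_finder_loop none ts =
      !((ts.any (fun t => pvIsNum t && PySem.Chars.isIn ['.'] t)) &&
        (ts.any (fun t => pvIsNum t && !PySem.Chars.isIn ['.'] t))) := by
  induction ts with
  | nil => rfl
  | cons t ts ih =>
    simp only [error_finder_loop, List.any_cons]
    by_cases h : pvIsNum t = true
    · by_cases hc : PySem.Chars.isIn ['.'] t = true
      · simp [h, hc, pvLoop_zero ts]
      · simp [h, hc, pvLoop_one ts]
    · simp [h, ih]

-- ===== VERDICT (by name: the statement is the Claim_ definition above) =====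
theorem error_finder_spec : Claim_equal_error_finder := by
  intro postfix_ _
  unfold Spec_error_finder error_finder error_finder_alt
  rw [pvLoop_none]
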